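-- pv_equiv track=rewrite | github.com/MangoGreenTeaz/new | scene_label.py | has_consecutive_category_poi
-- ===== SOURCE A (Python) =====
-- def contains_any_keyword(value: object, keywords: list[str]) -> bool:
--     return isinstance(value, str) and any(keyword in value for keyword in keywords)
--
-- def has_consecutive_category_poi(
--     rows: list[dict[str, object]],
--     start_index: int,
--     end_index: int,
--     keywords: list[str],
-- ) -> bool:
--     consecutive_count = 0
--
--     for index in range(start_index, end_index):
--         if contains_any_keyword(rows[index].get("poi"), keywords):
--             consecutive_count += 1
--             if consecutive_count >= 2:
--                 return True
--         else:
--             consecutive_count = 0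
--
--     return False
-- ===== SOURCE B (Python) =====
-- def contains_any_keyword(value: object, keywords: list[str]) -> bool:
--     return isinstance(value, str) and any(keyword in value for keyword in keywords)
--
--
-- def has_consecutive_category_poi(rows, start_index, end_index, keywords):
--     # Lazy pairwise scan: first index i whose row and the next row both match a
--     # keyword; no counter state, no early-return machinery.
--     return any(
--         contains_any_keyword(rows[i].get("poi"), keywords)
--         and contains_any_keyword(rows[i + 1].get("poi"), keywords)
--         for i in range(start_index, end_index - 1)
--     )
-- ===== Notes on version B (the rewrite author's own statement) =====
-- stated objective: alternative
-- what changed: Replaces the stateful counter-reset loop with a lazy pairwise scan: any(match(rows[i]) and match(rows[i+1]) for i in range(start_index, end_index - 1)), with no counter state.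
-- outside the precondition, e.g. on has_consecutive_category_poi([{'poi': 'x'}, {'poi': 'x'}], 0, 5, ['x']): A returns True, B returns True
import Mathlib
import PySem

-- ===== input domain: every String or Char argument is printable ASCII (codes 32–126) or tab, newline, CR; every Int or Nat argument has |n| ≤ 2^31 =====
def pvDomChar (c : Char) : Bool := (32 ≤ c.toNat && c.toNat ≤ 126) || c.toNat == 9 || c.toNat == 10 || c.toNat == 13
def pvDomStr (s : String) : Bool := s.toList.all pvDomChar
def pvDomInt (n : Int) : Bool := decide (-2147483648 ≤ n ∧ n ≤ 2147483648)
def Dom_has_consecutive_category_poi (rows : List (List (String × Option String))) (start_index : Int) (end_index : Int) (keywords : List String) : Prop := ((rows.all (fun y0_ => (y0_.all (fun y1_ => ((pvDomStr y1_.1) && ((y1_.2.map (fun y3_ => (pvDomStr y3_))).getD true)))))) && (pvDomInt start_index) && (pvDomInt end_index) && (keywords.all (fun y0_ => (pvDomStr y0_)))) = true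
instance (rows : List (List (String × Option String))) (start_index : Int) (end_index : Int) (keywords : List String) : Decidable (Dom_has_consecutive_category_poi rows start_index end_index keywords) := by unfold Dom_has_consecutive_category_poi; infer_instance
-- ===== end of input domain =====

-- B replaces A's stateful counter-reset loop by a lazy pairwise scan: the first
-- index i whose row and the next row both match a keyword; same cost, not faster.

-- ===== PORT A =====
-- shared module helper: contains_any_keyword(row.get("poi"), keywords)
-- (value : Option (Option String): none = key missing; some none = stored None; some (some s) = a str)
def pvContainsAnyKeyword (value : Option (Option String)) (keywords : List String) : Bool :=
  match value with
  | some (some s) => keywords.any (fun keyword => PySem.Str.isIn keyword s)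
  | _ => false

-- A's for-loop over range(start_index, end_index) with the consecutive_count state;
-- pyGet? = none is Python's IndexError (excluded by Pre_); the port returns false there.
def pvLoopA (rows : List (List (String × Option String))) (keywords : List String) :
    List Int → Int → Bool
  | [], _ => false
  | index :: rest, consecutive_count =>
    match PySem.List.pyGet? rows index with
    | none => false
    | some row =>
      if pvContainsAnyKeyword ((PySem.Dict.mk row).get? "poi") keywords then
        if consecutive_count + 1 ≥ 2 then true
        else pvLoopA rows keywords rest (consecutive_count + 1)
      else pvLoopA rows keywords rest 0

def has_consecutive_category_poi (rows : List (List (String × Option String))) (start_index : Int) (end_index : Int) (keywords : List String) : Bool :=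
  pvLoopA rows keywords (PySem.List.pyRange start_index end_index 1) 0

-- ===== PORT B =====
-- the generator body: contains_any_keyword(rows[i].get("poi"), keywords)
def pvFlag (rows : List (List (String × Option String))) (keywords : List String) (i : Int) : Bool :=
  match PySem.List.pyGet? rows i with
  | none => false   -- IndexError in Python B; excluded by Pre_
  | some row => pvContainsAnyKeyword ((PySem.Dict.mk row).get? "poi") keywords

-- any(flag(i) and flag(i+1) for i in range(start_index, end_index - 1))
def has_consecutive_category_poi_alt (rows : List (List (String × Option String))) (start_index : Int) (end_index : Int) (keywords : List String) : Bool :=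
  (PySem.List.pyRange start_index (end_index - 1) 1).any
    (fun i => pvFlag rows keywords i && pvFlag rows keywords (i + 1))

-- ===== PRECONDITION & SPEC =====
-- Pre_ excludes nonempty index ranges reaching outside rows' bounds: there A in
-- general raises IndexError; where A instead returns True via its early exit before
-- touching the first invalid index, B returns the same True (see the cite), but the
-- proof covers only the in-bounds case.
def Pre_has_consecutive_category_poi (rows : List (List (String × Option String))) (start_index : Int) (end_index : Int) (keywords : List String) : Prop :=
  end_index ≤ start_index ∨ (-(rows.length : Int) ≤ start_index ∧ end_index ≤ rows.length)
instance (rows : List (List (String × Option String))) (start_index : Int) (end_index : Int) (keywords : List String) : Decidable (Pre_has_consecutive_category_poi rows start_index end_index keywords) := by unfold Pre_has_consecutive_category_poi; infer_instance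

def pvWitness_has_consecutive_category_poi : (List (List (String × Option String))) × Int × Int × List String :=
  ([[("poi", some "cafe one")], [("poi", some "big cafe")], [("name", none)]], 0, 3, ["cafe"])

def Spec_has_consecutive_category_poi (rows : List (List (String × Option String))) (start_index : Int) (end_index : Int) (keywords : List String) (out : Bool) : Prop := out = has_consecutive_category_poi_alt rows start_index end_index keywords
instance (rows : List (List (String × Option String))) (start_index : Int) (end_index : Int) (keywords : List String) (out : Bool) : Decidable (Spec_has_consecutive_category_poi rows start_index end_index keywords out) := by unfold Spec_has_consecutive_category_poi; infer_instance

-- ===== CLAIM =====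
def Claim_equal_has_consecutive_category_poi : Prop := ∀ (rows : List (List (String × Option String))) (start_index : Int) (end_index : Int) (keywords : List String), Dom_has_consecutive_category_poi rows start_index end_index keywords → Pre_has_consecutive_category_poi rows start_index end_index keywords → Spec_has_consecutive_category_poi rows start_index end_index keywords (has_consecutive_category_poi rows start_index end_index keywords)

-- ===== LEMMAS AND PROOFS =====

-- adjacent-pair "any" of a flag list
def pvAnyAdj (flags : List Bool) : Bool :=
  (flags.zip flags.tail).any (fun p => p.1 && p.2)

theorem pvAnyAdj_cons (a : Bool) (rest : List Bool) :
    pvAnyAdj (a :: rest) = ((a && rest.headD false) || pvAnyAdj rest) := by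
  cases rest with
  | nil => simp [pvAnyAdj]
  | cons b r => simp [pvAnyAdj, List.any_cons]

-- A's counter loop, over any index list whose every index is in range,
-- equals the adjacent-pair scan of the flag list (plus a head correction for
-- an already-started run encoded in the counter).
theorem pvLoopA_eq (rows : List (List (String × Option String))) (keywords : List String) :
    ∀ (is : List Int) (c : Int), 0 ≤ c →
      (∀ i ∈ is, (PySem.List.pyGet? rows i).isSome) →
      pvLoopA rows keywords is c =
        (pvAnyAdj (is.map (pvFlag rows keywords)) ||
          (decide (1 ≤ c) && (is.map (pvFlag rows keywords)).headD false)) := by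
  intro is
  induction is with
  | nil => intro c _ _; simp [pvLoopA, pvAnyAdj]
  | cons i rest ih =>
    intro c hc h
    obtain ⟨row, hrow⟩ := Option.isSome_iff_exists.mp (h i (by simp))
    have hrest : ∀ j ∈ rest, (PySem.List.pyGet? rows j).isSome := fun j hj => h j (by simp [hj])
    have hflag : pvFlag rows keywords i = pvContainsAnyKeyword ((PySem.Dict.mk row).get? "poi") keywords := by
      simp [pvFlag, hrow]
    by_cases hF : pvContainsAnyKeyword ((PySem.Dict.mk row).get? "poi") keywords = true
    · by_cases hc1 : 1 ≤ c
      · have : pvLoopA rows keywords (i :: rest) c = true := by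
          simp only [pvLoopA, hrow]
          rw [if_pos hF, if_pos (by omega)]
        rw [this, List.map_cons, pvAnyAdj_cons]
        simp [hflag, hF, hc1]
      · have hc0 : c = 0 := by omega
        have hstep : pvLoopA rows keywords (i :: rest) c = pvLoopA rows keywords rest (c + 1) := by
          simp only [pvLoopA, hrow]
          rw [if_pos hF, if_neg (by omega)]
        rw [hstep, ih (c + 1) (by omega) hrest]
        rw [List.map_cons, pvAnyAdj_cons]
        have h1 : decide (1 ≤ c + 1) = true := by simp [hc0]
        have h0 : decide (1 ≤ c) = false := by simp [hc0]
        rw [h1, h0, hflag, hF]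
        simp [Bool.or_comm]
    · have hstep : pvLoopA rows keywords (i :: rest) c = pvLoopA rows keywords rest 0 := by
        simp only [pvLoopA, hrow]
        rw [if_neg hF]
      rw [hstep, ih 0 (by omega) hrest]
      rw [List.map_cons, pvAnyAdj_cons]
      have hF' : pvFlag rows keywords i = false := by
        rw [hflag]; exact Bool.not_eq_true _ |>.mp hF
      simp [hF']

-- the adjacent-pair scan of the flag list over [s, e) is B's pairwise any over [s, e-1)
theorem pvAnyAdj_pyRange (f : Int → Bool) :
    ∀ (n : Nat) (s e : Int), e - s ≤ n →
      pvAnyAdj ((PySem.List.pyRange s e 1).map f) =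
        (PySem.List.pyRange s (e - 1) 1).any (fun i => f i && f (i + 1)) := by
  intro n
  induction n with
  | zero =>
    intro s e he
    rw [PySem.List.pyRange_one_eq_nil (by omega), PySem.List.pyRange_one_eq_nil (by omega)]
    simp [pvAnyAdj]
  | succ m ih =>
    intro s e he
    by_cases hle : e - s ≤ (m : Int)
    · exact ih s e hle
    · rcases Nat.eq_zero_or_pos m with hm | hm
      · -- singleton range
        rw [PySem.List.pyRange_one_cons (by omega), PySem.List.pyRange_one_eq_nil (by omega),
            PySem.List.pyRange_one_eq_nil (by omega)]
        simp [pvAnyAdj]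
      · -- at least two elements
        have hse : s + 1 < e := by omega
        rw [PySem.List.pyRange_one_cons (by omega : s < e),
            PySem.List.pyRange_one_cons (by omega : s < e - 1)]
        rw [List.map_cons, pvAnyAdj_cons, List.any_cons]
        rw [ih (s + 1) e (by omega)]
        have hhead : ((PySem.List.pyRange (s + 1) e 1).map f).headD false = f (s + 1) := by
          rw [PySem.List.pyRange_one_cons hse]; simp
        rw [hhead]

-- ===== VERDICT =====
theorem has_consecutive_category_poi_spec : Claim_equal_has_consecutive_category_poi := by
  intro rows start_index end_index keywords _ hpre
  unfold Spec_has_consecutive_category_poi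
  unfold has_consecutive_category_poi has_consecutive_category_poi_alt
  have hall : ∀ i ∈ PySem.List.pyRange start_index end_index 1,
      (PySem.List.pyGet? rows i).isSome := by
    intro i hi
    rw [PySem.List.mem_pyRange_one] at hi
    rcases hpre with h | ⟨h1, h2⟩
    · omega
    · have hin : PySem.Raise.InRange rows.length i := by
        unfold PySem.Raise.InRange; omega
      have hne : PySem.List.pyGet? rows i ≠ none := by
        intro hn
        rw [PySem.List.pyGet?_eq_none_iff] at hn
        exact hn hin
      exact Option.ne_none_iff_isSome.mp hne
  rw [pvLoopA_eq rows keywords _ 0 (by omega) hall]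
  rw [pvAnyAdj_pyRange (pvFlag rows keywords) (end_index - start_index).toNat
        start_index end_index (by omega)]
  simp
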